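-- pv_equiv track=rewrite | github.com/kylec43/kwic-gui | offsets.py | getCircularShifts
-- ===== SOURCE A (Python) =====
-- def getCircularShifts(line):
--
-- 	lis = line.split()
--
-- 	if len(lis) <= 1:
-- 		return lis
--
-- 	circularShifts = []
-- 	i = 0
-- 	while i < len(lis):
-- 		word = lis[0]
-- 		lis.pop(0)
-- 		lis.append(word)
-- 		shiftedLine = " ".join(lis)
-- 		circularShifts.append(shiftedLine)
-- 		i+=1
--
-- 	return circularShifts
-- ===== SOURCE B (Python) =====
-- def getCircularShifts(line):
--     words = line.split()
--     n = len(words)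
--     if n <= 1:
--         return words
--     return [" ".join(words[i:] + words[:i]) for i in range(1, n + 1)]
-- ===== Notes on version B (the rewrite author's own statement) =====
-- stated objective: simpler
-- what changed: Replaced the destructive pop(0)/append queue rotation with stateless index-based slicing: each shift is built independently as the space-join of words[i:] + words[:i] in a comprehension over offsets 1..n.
import Mathlib
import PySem

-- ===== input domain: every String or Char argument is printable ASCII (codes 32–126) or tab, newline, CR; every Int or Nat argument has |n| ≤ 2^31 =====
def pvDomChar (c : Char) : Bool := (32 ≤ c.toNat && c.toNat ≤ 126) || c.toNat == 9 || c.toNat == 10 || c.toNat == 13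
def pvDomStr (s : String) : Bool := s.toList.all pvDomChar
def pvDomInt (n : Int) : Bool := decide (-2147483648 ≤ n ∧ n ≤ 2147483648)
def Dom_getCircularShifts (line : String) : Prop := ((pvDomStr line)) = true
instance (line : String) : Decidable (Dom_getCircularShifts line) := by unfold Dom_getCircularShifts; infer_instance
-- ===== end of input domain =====

-- B replaces A's destructive pop(0)/append rotation by independent slice-based shifts in a comprehension (objective: simpler).
-- ===== PORT A =====
-- A's while loop: each iteration moves the head to the back and records the join; i counts up to len(lis),
-- which the pop/append pair keeps constant, so the loop runs exactly (original length) times = the fuel here.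
def gcsLoopA : List String → Nat → List String
  | _, 0 => []
  | [], _ + 1 => []  -- unreachable: the loop only runs with lis nonempty (guard len ≤ 1 returned earlier)
  | w :: rest, k + 1 =>
    let lis' := rest ++ [w]
    PySem.Str.join " " lis' :: gcsLoopA lis' k

def getCircularShifts (line : String) : List String :=
  let lis := PySem.Str.split₀ line
  if lis.length ≤ 1 then lis
  else gcsLoopA lis lis.length

-- ===== PORT B =====
def getCircularShifts_alt (line : String) : List String :=
  let words := PySem.Str.split₀ line
  let n := words.length
  if n ≤ 1 then words
  else (PySem.List.pyRange 1 ((n : Int) + 1) 1).map (fun i =>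
    PySem.Str.join " " (PySem.List.slice words (some i) none ++ PySem.List.slice words none (some i)))

-- ===== PRECONDITION & SPEC =====
def Spec_getCircularShifts (line : String) (out : List String) : Prop := out = getCircularShifts_alt line
instance (line : String) (out : List String) : Decidable (Spec_getCircularShifts line out) := by unfold Spec_getCircularShifts; infer_instance

-- ===== CLAIM (what is proved, stated in full; the proofs are below) =====
def Claim_equal_getCircularShifts : Prop := ∀ (line : String), Dom_getCircularShifts line → Spec_getCircularShifts line (getCircularShifts line)

-- ===== LEMMAS AND PROOFS =====

-- ===== VERDICT (by name: the statement is the Claim_ definition above) =====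
-- A's loop yields the join of the (i+1)-fold rotation at step i, expressed by drop/take.
lemma gcsLoopA_eq (k : Nat) : ∀ (l : List String), l ≠ [] → k ≤ l.length →
    gcsLoopA l k = (List.range k).map (fun i =>
      PySem.Str.join " " (l.drop (i + 1) ++ l.take (i + 1))) := by
  induction k with
  | zero => intro l _ _; simp [gcsLoopA]
  | succ k ih =>
    intro l hne hk
    match l with
    | w :: rest =>
      have hlen : (rest ++ [w]).length = rest.length + 1 := by simp
      have hrest : k ≤ rest.length := by simpa using hk
      rw [gcsLoopA, List.range_succ_eq_map, List.map_cons, List.map_map]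
      refine congrArg₂ _ (by simp) ?_
      rw [ih (rest ++ [w]) (by simp) (by simp; omega)]
      refine List.map_congr_left ?_
      intro i hi
      have hik : i < k := List.mem_range.mp hi
      have hle : i + 1 ≤ rest.length := by omega
      simp only [Function.comp]
      congr 1
      rw [List.drop_append_of_le_length hle, List.take_append_of_le_length hle]
      simp [List.drop_succ_cons, List.take_succ_cons, List.append_assoc]

theorem getCircularShifts_spec : Claim_equal_getCircularShifts := by
  intro line _
  unfold Spec_getCircularShifts getCircularShifts getCircularShifts_alt
  set ws := PySem.Str.split₀ line with hws
  by_cases h : ws.length ≤ 1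
  · simp [h]
  · have hne : ws ≠ [] := by
      intro hnil; rw [hnil] at h; simp at h
    simp only [h]
    rw [gcsLoopA_eq ws.length ws hne le_rfl]
    rw [PySem.List.pyRange_one]
    have : ((ws.length : Int) + 1 - 1).toNat = ws.length := by omega
    rw [this, List.map_map]
    refine List.map_congr_left ?_
    intro i hi
    have : (0:Int) ≤ 1 + (i:Int) := by omega
    simp only [Function.comp]
    rw [PySem.List.slice_from ws this, PySem.List.slice_to ws this]
    congr 2 <;> [skip; skip] <;> congr 1 <;> omega
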